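-- pv_equiv track=rewrite | github.com/Vinavia/Crypto-Analyser | mod.py | has_mul_inv
-- ===== SOURCE A (Python) =====
-- def residue_list(mod):
--     if not isinstance(mod, int):
--         return 'Error(residue_list): Invalid mod'
--     if mod < 1:
--         return 'Error(residue_list): Invalid mod'
--     r_list = []
--
--     for i in range(mod):
--         r_list.append(i)
--
--     return r_list
--
-- def residue(num,mod):
--     if not isinstance(num, int):
--         return 'Error(residue): Invalid num'
--     if mod < 1:
--         return 'Error(residue): Invalid mod'
--
--     residue = num % mod
--
--     return residue
--
-- def has_mul_inv(a,m):
--     if not isinstance(a,int):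
--         return 'Error(has_mul_inv)" Invalid input num'
--
--     if not isinstance(m,int) or m < 1:
--         return 'Error(has_mul_inv): Invalid mod'
--
--     r_list = residue_list(m)
--     for i in r_list:
--
--         if residue(a * i,m) == 1:
--             return True
--
--     return False
-- ===== SOURCE B (Python) =====
-- def has_mul_inv(a, m):
--     if not isinstance(a, int):
--         return 'Error(has_mul_inv)" Invalid input num'
--
--     if not isinstance(m, int) or m < 1:
--         return 'Error(has_mul_inv): Invalid mod'
--
--     # Euclidean algorithm instead of scanning all residues.
--     x, y = a, m
--     while y:
--         x, y = y, x % y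
--     # x is now gcd(a, m) (nonnegative since m >= 1); an inverse exists
--     # iff a and m are coprime and 1 is an actual residue (m != 1).
--     return x == 1 and m != 1
-- ===== Notes on version B (the rewrite author's own statement) =====
-- stated objective: faster
-- what changed: Replaces the O(m) scan over all residues testing a*i % m == 1 with an explicit Euclidean-algorithm while-loop computing gcd(a, m), returning gcd == 1 and m != 1.
-- outside the precondition, e.g. on has_mul_inv(5, 0): A returns 'Error(has_mul_inv): Invalid mod', B returns 'Error(has_mul_inv): Invalid mod'
import Mathlib
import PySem

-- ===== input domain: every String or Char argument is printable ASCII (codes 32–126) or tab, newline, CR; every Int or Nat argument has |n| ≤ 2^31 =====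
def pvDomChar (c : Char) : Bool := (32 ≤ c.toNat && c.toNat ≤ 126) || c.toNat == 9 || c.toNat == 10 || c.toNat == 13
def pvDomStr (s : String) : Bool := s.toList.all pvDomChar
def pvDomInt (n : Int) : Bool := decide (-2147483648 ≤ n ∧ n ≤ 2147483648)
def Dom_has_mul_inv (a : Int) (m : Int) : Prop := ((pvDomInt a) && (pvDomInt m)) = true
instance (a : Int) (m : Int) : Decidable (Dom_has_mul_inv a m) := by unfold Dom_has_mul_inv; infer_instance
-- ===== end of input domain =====

-- B replaces A's O(m) residue scan by an explicit Euclidean-algorithm gcd loop (faster).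
-- For m < 1 the Python returns an error STRING, not a bool; those inputs are excluded by Pre_.

-- ===== PORT A =====
-- loop 'for i in r_list: if residue(a*i, m) == 1: return True' / 'return False'
def pvScan (a : Int) (m : Int) : List Int → Bool
  | [] => false
  | i :: rest => if PySem.Int.mod (a * i) m = 1 then true else pvScan a m rest

def has_mul_inv (a : Int) (m : Int) : Bool :=
  -- residue_list(m) = list(range(m)); then the scan above
  pvScan a m (PySem.List.pyRange 0 m 1)

-- ===== PORT B =====
-- needed by gcdLoop's termination: |x % y| < |y| for y ≠ 0 (Python mod)
theorem pv_mod_natAbs_lt (x y : Int) (h : y ≠ 0) : (PySem.Int.mod x y).natAbs < y.natAbs := by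
  rcases lt_or_gt_of_ne h with hn | hp
  · have h2 := PySem.Int.mod_neg_bounds (a := x) hn
    omega
  · have h1 := PySem.Int.mod_nonneg (a := x) hp
    have h2 := PySem.Int.mod_lt (a := x) hp
    omega

-- 'x, y = a, m; while y: x, y = y, x % y'
def gcdLoop (x y : Int) : Int :=
  if h : y = 0 then x else gcdLoop y (PySem.Int.mod x y)
termination_by y.natAbs
decreasing_by exact pv_mod_natAbs_lt x y h

def has_mul_inv_alt (a : Int) (m : Int) : Bool :=
  -- 'return x == 1 and m != 1'
  (gcdLoop a m == 1) && !(m == 1)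

-- ===== PRECONDITION & SPEC =====
-- Pre_ excludes m < 1, where the Python A returns an error string instead of a bool.
def Pre_has_mul_inv (a : Int) (m : Int) : Prop := 1 ≤ m
instance (a : Int) (m : Int) : Decidable (Pre_has_mul_inv a m) := by unfold Pre_has_mul_inv; infer_instance
def pvWitness_has_mul_inv : Int × Int := (7, 10)

def Spec_has_mul_inv (a : Int) (m : Int) (out : Bool) : Prop := out = has_mul_inv_alt a m
instance (a : Int) (m : Int) (out : Bool) : Decidable (Spec_has_mul_inv a m out) := by unfold Spec_has_mul_inv; infer_instance

-- ===== CLAIM (what is proved, stated in full; the proofs are below) =====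
def Claim_equal_has_mul_inv : Prop := ∀ (a : Int) (m : Int), Dom_has_mul_inv a m → Pre_has_mul_inv a m → Spec_has_mul_inv a m (has_mul_inv a m)

-- ===== LEMMAS AND PROOFS =====

-- the scan returns true iff some listed residue i has a*i % m == 1
theorem pvScan_iff (a m : Int) (l : List Int) :
    pvScan a m l = true ↔ ∃ i ∈ l, PySem.Int.mod (a * i) m = 1 := by
  induction l with
  | nil => simp [pvScan]
  | cons x rest ih => by_cases h : PySem.Int.mod (a * x) m = 1 <;> simp [pvScan, h, ih]

-- the Euclidean loop computes Int.gcd for positive second argument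
theorem gcdLoop_eq_gcd : ∀ (n : Nat) (x y : Int), y.natAbs ≤ n → 0 < y → gcdLoop x y = Int.gcd x y := by
  intro n
  induction n with
  | zero => intro x y h hy; omega
  | succ n ih =>
    intro x y h hy
    have hy0 : y ≠ 0 := ne_of_gt hy
    rw [gcdLoop, dif_neg hy0]
    have hme : PySem.Int.mod x y = x % y := PySem.Int.mod_eq_emod_of_pos hy
    rw [hme]
    have hr0 : 0 ≤ x % y := Int.emod_nonneg x hy0
    by_cases hr : x % y = 0
    · rw [hr, gcdLoop, dif_pos rfl]
      have hdvd : y ∣ x := Int.dvd_of_emod_eq_zero hr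
      rw [Int.gcd_eq_natAbs_right hdvd]
      omega
    · have hlt : (x % y).natAbs < y.natAbs := by
        have := Int.emod_lt_of_pos x hy
        omega
      rw [ih y (x % y) (by omega) (lt_of_le_of_ne hr0 (Ne.symm hr))]
      rw [Int.gcd_comm y (x % y)]
      exact congrArg _ (Int.gcd_emod x y)

-- existence of a residue inverse ↔ coprime and m ≥ 2
theorem exists_inv_iff (a m : Int) (hm : 1 ≤ m) :
    (∃ i ∈ PySem.List.pyRange 0 m 1, PySem.Int.mod (a * i) m = 1) ↔ (Int.gcd a m = 1 ∧ m ≠ 1) := by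
  have hm0 : (0:Int) < m := by omega
  constructor
  · rintro ⟨i, _, hmod⟩
    rw [PySem.Int.mod_eq_emod_of_pos hm0] at hmod
    have hm1 : m ≠ 1 := by
      intro h; rw [h, Int.emod_one] at hmod; exact one_ne_zero hmod.symm
    refine ⟨?_, hm1⟩
    have hdiv := Int.emod_add_mul_ediv (a * i) m
    rw [hmod] at hdiv
    have hco : IsCoprime a m := ⟨i, -(a * i / m), by linarith⟩
    exact Int.isCoprime_iff_gcd_eq_one.mp hco
  · rintro ⟨hg, hm1⟩
    have hm2 : (2:Int) ≤ m := by
      rcases lt_or_eq_of_le hm with h | h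
      · omega
      · exact absurd h.symm hm1
    obtain ⟨u, v, huv⟩ := Int.isCoprime_iff_gcd_eq_one.mpr hg
    refine ⟨u % m, ?_, ?_⟩
    · rw [PySem.List.mem_pyRange_one]
      exact ⟨Int.emod_nonneg u (by omega), Int.emod_lt_of_pos u hm0⟩
    · rw [PySem.Int.mod_eq_emod_of_pos hm0]
      have h1 : (a * (u % m)) % m = (a * u) % m := by
        rw [Int.mul_emod, Int.emod_emod_of_dvd u dvd_rfl, ← Int.mul_emod]
      have h2 : a * u = 1 - v * m := by linarith
      rw [h1, h2, mul_comm v m, Int.sub_mul_emod_self_left]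
      exact Int.emod_eq_of_lt (by omega) (by omega)

theorem pv_alt_eq (a m : Int) (hm : 1 ≤ m) :
    has_mul_inv_alt a m = true ↔ (Int.gcd a m = 1 ∧ m ≠ 1) := by
  unfold has_mul_inv_alt
  rw [gcdLoop_eq_gcd m.natAbs a m (le_refl _) (by omega)]
  simp [Nat.cast_eq_one]

theorem has_mul_inv_spec : Claim_equal_has_mul_inv := by
  intro a m _ hm
  unfold Spec_has_mul_inv
  rw [Bool.eq_iff_iff]
  unfold has_mul_inv
  rw [pvScan_iff, pv_alt_eq a m hm]
  exact exists_inv_iff a m hm
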